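-- pv_equiv track=rewrite | github.com/DiegoOF07/proyecto01-mate-discreta | set_operations.py | generate_bit_string
-- ===== SOURCE A (Python) =====
-- ALL_ELEMENTS = '0123456789ABCDEFGHIJKLMNOPQRSTUVWXYZ'
--
-- def generate_bit_string(users_input):
--     bit_string = '' # Cadena inicializada
--     universal_set_elements = ALL_ELEMENTS # Elementos del conjunto universal como un iterable ordenado
--
--     # Si el elemento se encuentra en el input del usuario se agrega un 1 a la cadena
--     for element in universal_set_elements:
--         if element in users_input:
--             bit_string += '1'
--         else:
--             bit_string += '0'
--
--     return bit_string
-- ===== SOURCE B (Python) =====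
-- ALL_ELEMENTS = '0123456789ABCDEFGHIJKLMNOPQRSTUVWXYZ'
--
-- def generate_bit_string(users_input):
--     pos = {e: i for i, e in enumerate(ALL_ELEMENTS)}
--     bits = ['0'] * len(ALL_ELEMENTS)
--     for item in users_input:
--         p = pos.get(item)
--         if p is not None:
--             bits[p] = '1'
--     return ''.join(bits)
-- ===== Notes on version B (the rewrite author's own statement) =====
-- stated objective: alternative
-- what changed: Instead of scanning the input once per universal element (36 substring-membership tests), B builds a position index over ALL_ELEMENTS once and makes a single pass over the input, scattering '1's into a fixed 36-slot bit list.
import Mathlib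
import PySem

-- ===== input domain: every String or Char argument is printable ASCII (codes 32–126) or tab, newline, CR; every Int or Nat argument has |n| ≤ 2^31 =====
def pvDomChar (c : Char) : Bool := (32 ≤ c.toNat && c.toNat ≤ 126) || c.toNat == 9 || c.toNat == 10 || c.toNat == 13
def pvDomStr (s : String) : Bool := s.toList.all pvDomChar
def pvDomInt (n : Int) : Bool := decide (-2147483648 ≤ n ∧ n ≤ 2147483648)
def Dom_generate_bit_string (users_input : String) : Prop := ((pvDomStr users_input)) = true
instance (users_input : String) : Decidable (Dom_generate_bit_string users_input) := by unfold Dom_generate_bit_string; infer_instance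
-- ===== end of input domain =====

set_option maxRecDepth 100000


-- B replaces A's 36 per-universal-element membership scans of the input by a single pass
-- over the input that scatters '1's into a fixed 36-slot bit list via a position dict (objective: alternative).

-- module constant ALL_ELEMENTS, shared by both source files
def pvAllElements : String := "0123456789ABCDEFGHIJKLMNOPQRSTUVWXYZ"

-- ===== PORT A =====
def generate_bit_string (users_input : String) : String :=
  -- bit_string = ''; for element in ALL_ELEMENTS: bit_string += '1' if element in users_input else '0'
  String.mk (pvAllElements.toList.foldl
    (fun acc element =>
      acc ++ [if PySem.Chars.isIn [element] users_input.toList then '1' else '0'])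
    ([] : List Char))

-- ===== PORT B =====
-- pos = {e: i for i, e in enumerate(ALL_ELEMENTS)}
def pvPosDict : PySem.Dict Char Int :=
  (PySem.List.enumerate pvAllElements.toList 0).foldl
    (fun d p => d.insert p.2 p.1) PySem.Dict.empty

-- loop body: p = pos.get(item); if p is not None: bits[p] = '1'
def pvScatterStep (b : List Char) (item : Char) : List Char :=
  match pvPosDict.get? item with
  | some p => PySem.List.pySetD b p '1'
  | none => b

def generate_bit_string_alt (users_input : String) : String :=
  -- bits = ['0'] * len(ALL_ELEMENTS)
  let bits0 : List Char := PySem.List.pyRepeat ['0'] (PySem.Str.len pvAllElements)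
  -- for item in users_input: p = pos.get(item); if p is not None: bits[p] = '1'
  let bits := users_input.toList.foldl pvScatterStep bits0
  -- return ''.join(bits)
  String.mk (PySem.Chars.join [] (bits.map (fun c => [c])))

-- ===== PRECONDITION & SPEC =====
def Spec_generate_bit_string (users_input : String) (out : String) : Prop := out = generate_bit_string_alt users_input
instance (users_input : String) (out : String) : Decidable (Spec_generate_bit_string users_input out) := by unfold Spec_generate_bit_string; infer_instance

-- ===== CLAIM (what is proved, stated in full; the proofs are below) =====
def Claim_equal_generate_bit_string : Prop := ∀ (users_input : String), Dom_generate_bit_string users_input → Spec_generate_bit_string users_input (generate_bit_string users_input)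

-- ===== LEMMAS AND PROOFS =====

-- the dict comprehension over an enumerated duplicate-free list looks up the index of its key
theorem get?_foldl_enum_insert (xs : List Char) (hx : xs.Nodup) (s : Int)
    (d : PySem.Dict Char Int) (c : Char) :
    ((PySem.List.enumerate xs s).foldl (fun d p => d.insert p.2 p.1) d).get? c
      = match PySem.List.index? xs c with
        | some k => some (s + k)
        | none => d.get? c := by
  induction xs generalizing s d with
  | nil => simp [PySem.List.enumerate, PySem.List.index?]
  | cons x xs ih =>
    rw [PySem.List.enumerate_cons]
    simp only [List.foldl_cons]
    rcases List.nodup_cons.mp hx with ⟨hxmem, hnd⟩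
    by_cases hcx : x = c
    · subst hcx
      have hnone := (PySem.List.index?_eq_none_iff xs x).mpr hxmem
      rw [ih hnd, hnone, PySem.List.index?_cons_self]
      simp [PySem.Dict.get?_insert_self]
    · rw [ih hnd, PySem.List.index?_cons_of_ne xs hcx]
      cases h : PySem.List.index? xs c with
      | none => simp [PySem.Dict.get?_insert_of_ne _ _ (Ne.symm hcx)]
      | some k =>
        simp only [Option.map_some]
        push_cast
        ring_nf

theorem pos_get (c : Char) :
    pvPosDict.get? c = (PySem.List.index? pvAllElements.toList c).map (fun k => (k : Int)) := by
  rw [pvPosDict, get?_foldl_enum_insert _ (by decide) 0 _ c]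
  cases h : PySem.List.index? pvAllElements.toList c with
  | none => simp [PySem.Dict.get?, PySem.Dict.empty]
  | some k => simp

theorem index?_all_eq_some_iff (c : Char) (i : Nat) (hi : i < 36) :
    PySem.List.index? pvAllElements.toList c = some i ↔
      c = pvAllElements.toList[i]'(hi.trans_eq (by decide)) := by
  constructor
  · intro h
    obtain ⟨hk, hget, -⟩ := PySem.List.getElem_of_index?_eq_some h
    exact hget.symm
  · intro h
    have hmem : c ∈ pvAllElements.toList := h ▸ List.getElem_mem _
    obtain ⟨j, hj⟩ := Option.isSome_iff_exists.mp
      ((PySem.List.index?_isSome_iff pvAllElements.toList c).mpr hmem)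
    obtain ⟨hkj, hgetj, -⟩ := PySem.List.getElem_of_index?_eq_some hj
    have hnd : (pvAllElements.toList).Nodup := by decide
    have hji : j = i := by
      apply (List.Nodup.getElem_inj_iff hnd).mp
      rw [hgetj, h]
    rw [hj, hji]

theorem pvScatterStep_eq (b : List Char) (item : Char) :
    pvScatterStep b item
      = (pvPosDict.get? item).elim b (fun p => PySem.List.pySetD b p '1') := by
  rw [pvScatterStep]
  cases pvPosDict.get? item <;> rfl

-- the bit list after scattering the input, slot by slot
theorem scatter_getD (xs : List Char) (bits : List Char) (i : Nat) (hi : i < bits.length) :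
    PySem.List.pyGetD (xs.foldl pvScatterStep bits) (i : Int) ' '
      = if xs.any (fun c => pvPosDict.get? c == some (i : Int)) then '1'
        else PySem.List.pyGetD bits (i : Int) ' ' := by
  induction xs generalizing bits with
  | nil => simp
  | cons x xs ih =>
    simp only [List.foldl_cons, List.any_cons]
    rw [pvScatterStep_eq]
    by_cases hex : ∃ p, pvPosDict.get? x = some p
    case neg =>
      have ho : pvPosDict.get? x = none := by
        cases h : pvPosDict.get? x
        · rfl
        · exact absurd ⟨_, h⟩ hex
      simp only [ho]
      simp only [Option.elim]
      rw [ih bits hi]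
      simp
    case pos =>
      obtain ⟨p, ho⟩ := hex
      simp only [ho]
      simp only [Option.elim]
      have hp : ∃ k : Nat, k < 36 ∧ p = (k : Int) := by
        have hpg := pos_get x
        rw [ho] at hpg
        cases h : PySem.List.index? pvAllElements.toList x with
        | none => rw [h] at hpg; simp at hpg
        | some k =>
          rw [h] at hpg
          obtain ⟨hk, -, -⟩ := PySem.List.getElem_of_index?_eq_some h
          refine ⟨k, by simpa using hk, ?_⟩
          have hpk : p = (k : Int) := by simpa using hpg
          omega
      obtain ⟨k, hk36, rfl⟩ := hp
      rw [PySem.List.pySetD_natCast]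
      rw [ih _ (by simpa using hi)]
      by_cases hki : k = i
      · subst hki
        rw [show (some ((k : Nat) : Int) == some ((k : Nat) : Int)) = true from by simp,
            Bool.true_or]
        by_cases hany : xs.any (fun c => pvPosDict.get? c == some ((k : Nat) : Int)) = true
        · simp [hany]
        · simp only [Bool.not_eq_true] at hany
          rw [hany]
          rw [PySem.List.pyGetD_eq_getElem _ _ (by positivity)
            (by rw [List.length_set]; exact_mod_cast hi)]
          simp [List.getElem_set_self]
      · have hne : (some ((k : Nat) : Int) == some ((i : Nat) : Int)) = false := by
          simp; omega
        rw [hne]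
        simp only [Bool.false_or]
        by_cases hany : xs.any (fun c => pvPosDict.get? c == some ((i : Nat) : Int)) = true
        · simp [hany]
        · simp only [Bool.not_eq_true] at hany
          rw [hany]
          simp only [if_neg Bool.false_ne_true]
          rw [PySem.List.pyGetD_eq_getElem _ _ (by positivity)
              (by rw [List.length_set]; exact_mod_cast hi),
              PySem.List.pyGetD_eq_getElem _ _ (by positivity) (by exact_mod_cast hi)]
          simp only [Int.toNat_natCast]
          exact List.getElem_set_ne (by omega) _

theorem length_scatter (xs : List Char) (bits : List Char) :
    (xs.foldl pvScatterStep bits).length = bits.length := by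
  induction xs generalizing bits with
  | nil => rfl
  | cons x xs ih =>
    simp only [List.foldl_cons]
    rw [ih]
    rw [pvScatterStep]
    cases pvPosDict.get? x <;> simp [PySem.List.length_pySetD]

-- ===== VERDICT (by name: the statement is the Claim_ definition above) =====
theorem generate_bit_string_spec : Claim_equal_generate_bit_string := by
  intro users_input _
  unfold Spec_generate_bit_string generate_bit_string generate_bit_string_alt
  rw [PySem.List.foldl_append_singleton_eq_map]
  simp only [List.nil_append]
  congr 1
  rw [PySem.Chars.join_nil_singletons]
  have hlen0 : (PySem.List.pyRepeat ['0'] (PySem.Str.len pvAllElements)).length = 36 := by decide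
  have hrep : PySem.List.pyRepeat ['0'] (PySem.Str.len pvAllElements)
      = List.replicate 36 '0' := by decide
  apply List.ext_getElem
  · rw [List.length_map, length_scatter, hlen0]; decide
  · intro i hi hi'
    have h36 : i < 36 := by
      rw [length_scatter, hlen0] at hi'; exact hi'
    have hgi := scatter_getD users_input.toList
      (PySem.List.pyRepeat ['0'] (PySem.Str.len pvAllElements)) i (by omega)
    rw [PySem.List.pyGetD_eq_getElem _ _ (by positivity)
      (by rw [length_scatter, hlen0]; exact_mod_cast h36)] at hgi
    simp only [Int.toNat_natCast] at hgi
    rw [List.getElem_map, hgi]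
    by_cases hmem : pvAllElements.toList[i]'(h36.trans_eq (by decide)) ∈ users_input.toList
    · have hany : users_input.toList.any (fun c => pvPosDict.get? c == some (i : Int)) = true := by
        rw [List.any_eq_true]
        refine ⟨_, hmem, ?_⟩
        rw [pos_get, (index?_all_eq_some_iff _ i h36).mpr rfl]
        simp
      have hisin : PySem.Chars.isIn [pvAllElements.toList[i]'(h36.trans_eq (by decide))]
          users_input.toList = true :=
        (PySem.Chars.isIn_iff_infix _ _).mpr ((List.singleton_infix_iff _ _).mpr hmem)
      rw [hany, hisin]
      simp
    · have hany : users_input.toList.any (fun c => pvPosDict.get? c == some (i : Int)) = false := by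
        rw [Bool.eq_false_iff]
        intro hc
        obtain ⟨c, hcmem, hceq⟩ := List.any_eq_true.mp hc
        have : PySem.List.index? pvAllElements.toList c = some i := by
          have := pos_get c
          rw [eq_of_beq hceq] at this
          cases h : PySem.List.index? pvAllElements.toList c with
          | none => rw [h] at this; simp at this
          | some k =>
            rw [h] at this
            have hki : k = i := by
              have h2 : (i : Int) = (k : Int) := by simpa using this
              omega
            rw [hki]
        have := (index?_all_eq_some_iff c i h36).mp this
        exact hmem (this ▸ hcmem)
      have hisin : PySem.Chars.isIn [pvAllElements.toList[i]'(h36.trans_eq (by decide))]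
          users_input.toList = false := by
        rw [Bool.eq_false_iff]
        intro hc
        exact hmem ((List.singleton_infix_iff _ _).mp ((PySem.Chars.isIn_iff_infix _ _).mp hc))
      rw [hany, hisin, hrep]
      rw [PySem.List.pyGetD_eq_getElem _ _ (by positivity) (by simp; omega)]
      simp only [Int.toNat_natCast, List.getElem_replicate]
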